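-- pv_equiv track=rewrite | github.com/artemvovk/practice | python/leetcode/problems.py | count_x_shapes
-- ===== SOURCE A (Python) =====
-- def count_x_shapes(maze):
--     def dimensions(maze):
--         return len(maze), len(maze[0])
--     def traverse(maze, visited, x, y):
--         height, width = dimensions(maze)
--         if x < 0 or x > width-1:
--             return
--         if y < 0 or y > height-1:
--             return
--         if maze[y][x] == 'O' or visited[y][x]:
--             return
--         visited[y][x] = True
--         traverse(maze, visited, x+1, y)
--         traverse(maze, visited, x, y+1)
--         traverse(maze, visited, x-1, y)
--         traverse(maze, visited, x, y-1)
--     height, width = dimensions(maze)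
--     shapes = 0
--     visited = [[False for i in range(width)] for i in range(height)]
--     for y in range(height):
--         for x in range(width):
--             if maze[y][x] == 'X' and not visited[y][x]:
--                 traverse(maze, visited, x, y)
--                 shapes += 1
--     return shapes
-- ===== SOURCE B (Python) =====
-- def count_x_shapes(maze):
--     height, width = len(maze), len(maze[0])
--     visited = [[False] * width for _ in range(height)]
--     shapes = 0
--     for i in range(height * width):
--         y, x = divmod(i, width)
--         if maze[y][x] == 'X' and not visited[y][x]:
--             shapes += 1
--             stack = [(x, y)]
--             while stack:
--                 cx, cy = stack.pop()
--                 if cx < 0 or cx >= width or cy < 0 or cy >= height: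
--                     continue
--                 if maze[cy][cx] == 'O' or visited[cy][cx]:
--                     continue
--                 visited[cy][cx] = True
--                 stack.extend([(cx, cy - 1), (cx - 1, cy), (cx, cy + 1), (cx + 1, cy)])
--     return shapes
-- ===== Notes on version B (the rewrite author's own statement) =====
-- stated objective: alternative
-- what changed: Replaces A's four-way recursive DFS flood fill and nested y/x scan loops with an iterative explicit-stack flood fill driven by a single flat loop over cell indices with divmod; Pre_ excludes only the inputs on which A raises IndexError (empty maze or a row shorter than the first row).
import Mathlib
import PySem

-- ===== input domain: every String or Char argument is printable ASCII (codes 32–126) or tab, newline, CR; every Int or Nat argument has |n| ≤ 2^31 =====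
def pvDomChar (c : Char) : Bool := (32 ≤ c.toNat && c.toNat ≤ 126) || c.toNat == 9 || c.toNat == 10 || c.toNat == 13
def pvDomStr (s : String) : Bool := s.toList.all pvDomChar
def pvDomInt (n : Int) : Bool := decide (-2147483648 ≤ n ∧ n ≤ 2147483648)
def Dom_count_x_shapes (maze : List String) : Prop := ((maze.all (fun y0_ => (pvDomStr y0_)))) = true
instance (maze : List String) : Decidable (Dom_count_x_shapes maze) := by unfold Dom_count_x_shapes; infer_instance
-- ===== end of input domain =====

-- B replaces A's four-way recursive DFS flood fill and nested y/x scan loops by an iterative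
-- explicit-stack flood fill driven by one flat loop over cell indices with divmod (alternative
-- decomposition, same asymptotic cost); equivalence is proved on all inputs where A returns.

-- ===== PORT A =====
-- shared grid accessors (helpers used by both ports; exact on the guarded in-range uses below)
-- maze[y][x] as an Option Char (none = out of range; both programs only compare it to 'X'/'O')
def pvCell (maze : List String) (x y : Int) : Option Char :=
  match PySem.List.pyGet? maze y with
  | some row => PySem.Str.pyGet? row x
  | none => none

-- visited[y][x]; both programs read it only after the 0 ≤ y < height, 0 ≤ x < width guards,
-- where pyGet? is exact
def pvVGet (v : List (List Bool)) (x y : Int) : Bool :=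
  match PySem.List.pyGet? v y with
  | some row => (PySem.List.pyGet? row x).getD false
  | none => false

-- visited[y][x] = True; only called with 0 ≤ x, 0 ≤ y (guarded), where .toNat is exact
def pvVSet (v : List (List Bool)) (x y : Int) : List (List Bool) :=
  v.set y.toNat ((v.getD y.toNat []).set x.toNat true)

-- A's recursive traverse; the fuel argument only makes the recursion structural and is chosen
-- large enough to never run out (proved below), so it adds no behaviour
def pvDfsA (maze : List String) (h w : Int) : Nat → List (List Bool) → Int → Int → List (List Bool)
  | 0, v, _, _ => v
  | f + 1, v, x, y =>
    if x < 0 ∨ w - 1 < x then v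
    else if y < 0 ∨ h - 1 < y then v
    else if pvCell maze x y = some 'O' ∨ pvVGet v x y = true then v
    else
      let v1 := pvVSet v x y
      let v2 := pvDfsA maze h w f v1 (x + 1) y
      let v3 := pvDfsA maze h w f v2 x (y + 1)
      let v4 := pvDfsA maze h w f v3 (x - 1) y
      pvDfsA maze h w f v4 x (y - 1)

def count_x_shapes (maze : List String) : Int :=
  let h : Int := maze.length
  let w : Int := PySem.Str.len (maze.headD "")   -- len(maze[0]); Pre_ excludes the empty maze where Python raises
  let fuel := h.toNat * w.toNat + 1
  let st := (PySem.List.pyRange 0 h 1).foldl (fun st y =>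
      (PySem.List.pyRange 0 w 1).foldl (fun st x =>
        if pvCell maze x y = some 'X' ∧ pvVGet st.1 x y = false then
          (pvDfsA maze h w fuel st.1 x y, st.2 + 1)
        else st) st)
    (List.replicate h.toNat (List.replicate w.toNat false), (0 : Int))
  st.2

-- ===== PORT B =====
-- B's while-loop over an explicit stack (head = top of stack; Python pushes the four neighbours
-- so that pop order is right, down, left, up); fuel only makes the loop structural and never
-- runs out (proved below)
def pvFloodB (maze : List String) (h w : Int) : Nat → List (List Bool) → List (Int × Int) → List (List Bool)
  | _, v, [] => v
  | 0, v, _ => v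
  | f + 1, v, (cx, cy) :: s =>
    if cx < 0 ∨ w ≤ cx ∨ cy < 0 ∨ h ≤ cy then pvFloodB maze h w f v s
    else if pvCell maze cx cy = some 'O' ∨ pvVGet v cx cy = true then pvFloodB maze h w f v s
    else pvFloodB maze h w f (pvVSet v cx cy)
          ((cx + 1, cy) :: (cx, cy + 1) :: (cx - 1, cy) :: (cx, cy - 1) :: s)

def count_x_shapes_alt (maze : List String) : Int :=
  let h : Int := maze.length
  let w : Int := PySem.Str.len (maze.headD "")   -- len(maze[0]); Pre_ excludes the empty maze where Python raises
  let fuel := 4 * (h.toNat * w.toNat) + 2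
  let st := (PySem.List.pyRange 0 (h * w) 1).foldl (fun st i =>
      let y := PySem.Int.floordiv i w
      let x := PySem.Int.mod i w
      if pvCell maze x y = some 'X' ∧ pvVGet st.1 x y = false then
        (pvFloodB maze h w fuel st.1 [(x, y)], st.2 + 1)
      else st)
    (List.replicate h.toNat (List.replicate w.toNat false), (0 : Int))
  st.2

-- ===== PRECONDITION & SPEC =====
-- Pre_ excludes exactly the inputs where Python A raises IndexError: the empty maze (maze[0])
-- and mazes with a row shorter than the first row (maze[y][x] with x < len(maze[0]))
def Pre_count_x_shapes (maze : List String) : Prop :=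
  maze ≠ [] ∧ ∀ r ∈ maze, (maze.headD "").toList.length ≤ r.toList.length
instance (maze : List String) : Decidable (Pre_count_x_shapes maze) := by
  unfold Pre_count_x_shapes; infer_instance

def pvWitness_count_x_shapes : List String := ["XOX", "OXO"]

def Spec_count_x_shapes (maze : List String) (out : Int) : Prop := out = count_x_shapes_alt maze
instance (maze : List String) (out : Int) : Decidable (Spec_count_x_shapes maze out) := by
  unfold Spec_count_x_shapes; infer_instance

-- ===== CLAIM (what is proved, stated in full; the proofs are below) =====
def Claim_equal_count_x_shapes : Prop := ∀ (maze : List String), Dom_count_x_shapes maze → Pre_count_x_shapes maze → Spec_count_x_shapes maze (count_x_shapes maze)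

-- ===== LEMMAS AND PROOFS =====

-- shape of the visited grid: height h, every row width w
def pvShape (v : List (List Bool)) (h w : Int) : Prop :=
  v.length = h.toNat ∧ ∀ r ∈ v, r.length = w.toNat

-- number of still-unvisited entries
def pvUnvis (v : List (List Bool)) : Nat := (v.map (fun r => r.count false)).sum

theorem pv_count_false_set_le (r : List Bool) (n : Nat) :
    (r.set n true).count false ≤ r.count false := by
  induction r generalizing n with
  | nil => simp
  | cons a r ih =>
    cases n with
    | zero => cases a <;> simp [List.count_cons]
    | succ m => cases a <;> simpa [List.count_cons] using ih m

theorem pv_count_false_set_lt (r : List Bool) (n : Nat) (h : r[n]? = some false) :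
    (r.set n true).count false < r.count false := by
  induction r generalizing n with
  | nil => simp at h
  | cons a r ih =>
    cases n with
    | zero =>
      simp at h
      subst h; simp [List.count_cons]
    | succ m =>
      simp at h
      cases a <;> simpa [List.count_cons] using ih m h

theorem pv_unvis_set_le (v : List (List Bool)) (n : Nat) (r' : List Bool)
    (hle : r'.count false ≤ (v.getD n []).count false) :
    pvUnvis (v.set n r') ≤ pvUnvis v := by
  induction v generalizing n with
  | nil => simp [pvUnvis]
  | cons r v ih =>
    cases n with
    | zero => simp [pvUnvis] at hle ⊢; omega
    | succ m =>
      simp [pvUnvis] at ih ⊢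
      have := ih m (by simpa using hle)
      omega

theorem pv_unvis_set_lt (v : List (List Bool)) (n : Nat) (r' : List Bool)
    (hn : n < v.length) (hlt : r'.count false < (v.getD n []).count false) :
    pvUnvis (v.set n r') < pvUnvis v := by
  induction v generalizing n with
  | nil => simp at hn
  | cons r v ih =>
    cases n with
    | zero => simp [pvUnvis] at hlt ⊢; omega
    | succ m =>
      simp at hn
      simp [pvUnvis] at ih ⊢
      have := ih m hn (by simpa using hlt)
      omega

theorem pv_shape_vset (v : List (List Bool)) (h w x y : Int) (hs : pvShape v h w)
    (hy : y.toNat < v.length) : pvShape (pvVSet v x y) h w := by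
  obtain ⟨h1, h2⟩ := hs
  refine ⟨by simpa [pvVSet] using h1, ?_⟩
  intro r hr
  rcases List.mem_or_eq_of_mem_set hr with h | h
  · exact h2 r h
  · subst h
    rw [List.length_set, List.getD_eq_getElem?_getD, List.getElem?_eq_getElem hy]
    exact h2 _ (List.getElem_mem hy)

theorem pv_unvis_vset_le (v : List (List Bool)) (x y : Int) :
    pvUnvis (pvVSet v x y) ≤ pvUnvis v :=
  pv_unvis_set_le v _ _ (pv_count_false_set_le _ _)

-- reading an in-range unvisited cell: strict decrease when marking it
theorem pv_unvis_vset_lt (v : List (List Bool)) (h w x y : Int) (hs : pvShape v h w)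
    (hx0 : 0 ≤ x) (hxw : x < w) (hy0 : 0 ≤ y) (hyh : y < h)
    (hget : pvVGet v x y = false) : pvUnvis (pvVSet v x y) < pvUnvis v := by
  obtain ⟨h1, h2⟩ := hs
  have hy : y.toNat < v.length := by omega
  have hrow : PySem.List.pyGet? v y = some v[y.toNat] := by
    rw [PySem.List.pyGet?_of_nonneg v hy0, List.getElem?_eq_getElem hy]
  have hw : x.toNat < v[y.toNat].length := by
    have := h2 _ (List.getElem_mem hy); omega
  have hcell : v[y.toNat][x.toNat] = false := by
    simp only [pvVGet, hrow] at hget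
    rw [PySem.List.pyGet?_of_nonneg _ hx0, List.getElem?_eq_getElem hw] at hget
    simpa using hget
  apply pv_unvis_set_lt _ _ _ hy
  rw [List.getD_eq_getElem?_getD, List.getElem?_eq_getElem hy]
  simp only [Option.getD_some]
  exact pv_count_false_set_lt _ _ (by rw [List.getElem?_eq_getElem hw, hcell])

-- A's DFS preserves the grid shape and never unmarks a cell
theorem pv_dfsA_mono (maze : List String) (h w : Int) (f : Nat) :
    ∀ (v : List (List Bool)) (x y : Int), pvShape v h w →
      pvShape (pvDfsA maze h w f v x y) h w ∧
      pvUnvis (pvDfsA maze h w f v x y) ≤ pvUnvis v := by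
  induction f with
  | zero => intro v x y hs; exact ⟨hs, le_rfl⟩
  | succ f ih =>
    intro v x y hs
    rw [pvDfsA]
    split
    · exact ⟨hs, le_rfl⟩
    split
    · exact ⟨hs, le_rfl⟩
    split
    · exact ⟨hs, le_rfl⟩
    · rename_i hx hy _
      push_neg at hx hy
      have hyv : y.toNat < v.length := by
        obtain ⟨h1, _⟩ := hs; omega
      have hs1 := pv_shape_vset v h w x y hs hyv
      have h1 := ih (pvVSet v x y) (x + 1) y hs1
      have h2 := ih _ x (y + 1) h1.1
      have h3 := ih _ (x - 1) y h2.1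
      have h4 := ih _ x (y - 1) h3.1
      exact ⟨h4.1, le_trans h4.2 (le_trans h3.2 (le_trans h2.2
        (le_trans h1.2 (pv_unvis_vset_le v x y))))⟩

-- B's flood fill does not depend on the fuel once the fuel dominates 4·unvisited + stack size
theorem pv_flood_fuel (maze : List String) (h w : Int) :
    ∀ (f g : Nat) (v : List (List Bool)) (s : List (Int × Int)), pvShape v h w →
      4 * pvUnvis v + s.length ≤ f → 4 * pvUnvis v + s.length ≤ g →
      pvFloodB maze h w f v s = pvFloodB maze h w g v s := by
  intro f
  induction f with
  | zero =>
    intro g v s _ hf _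
    have : s = [] := by
      cases s with
      | nil => rfl
      | cons a s => simp at hf
    subst this
    cases g <;> rfl
  | succ f ih =>
    intro g v s hs hf hg
    cases s with
    | nil => cases g <;> rfl
    | cons p s =>
      obtain ⟨cx, cy⟩ := p
      obtain ⟨g', rfl⟩ : ∃ g', g = g' + 1 := ⟨g - 1, by simp at hg; omega⟩
      rw [pvFloodB, pvFloodB]
      simp only [List.length_cons] at hf hg
      split
      · exact ih g' v s hs (by omega) (by omega)
      split
      · exact ih g' v s hs (by omega) (by omega)
      · rename_i hb hc
        push_neg at hb hc
        obtain ⟨hx0, hxw, hy0, hyh⟩ := hb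
        have hyv : cy.toNat < v.length := by obtain ⟨h1, _⟩ := hs; omega
        have hlt := pv_unvis_vset_lt v h w cx cy hs hx0 hxw hy0 hyh
          (by cases hv : pvVGet v cx cy <;> simp [hv] at hc ⊢)
        exact ih g' _ _ (pv_shape_vset v h w cx cy hs hyv)
          (by simp; omega) (by simp; omega)

-- the bridge: popping (x, y) and flooding equals running A's recursive DFS from (x, y)
theorem pv_bridge (maze : List String) (h w : Int) :
    ∀ (u : Nat) (v : List (List Bool)) (x y : Int) (s : List (Int × Int)) (f g : Nat),
      pvShape v h w → pvUnvis v = u → u < f → 4 * u + s.length ≤ g →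
      pvFloodB maze h w (g + 1) v ((x, y) :: s) = pvFloodB maze h w g (pvDfsA maze h w f v x y) s := by
  intro u
  induction u using Nat.strong_induction_on with
  | _ u ih =>
    intro v x y s f g hs hu hf hg
    obtain ⟨f', rfl⟩ : ∃ f', f = f' + 1 := ⟨f - 1, by omega⟩
    rw [pvFloodB, pvDfsA]
    by_cases hbx : x < 0 ∨ w - 1 < x
    · rw [if_pos (show x < 0 ∨ w ≤ x ∨ y < 0 ∨ h ≤ y by omega), if_pos hbx]
    by_cases hby : y < 0 ∨ h - 1 < y
    · rw [if_pos (show x < 0 ∨ w ≤ x ∨ y < 0 ∨ h ≤ y by omega), if_neg hbx, if_pos hby]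
    rw [if_neg (show ¬(x < 0 ∨ w ≤ x ∨ y < 0 ∨ h ≤ y) by omega), if_neg hbx, if_neg hby]
    by_cases hcv : pvCell maze x y = some 'O' ∨ pvVGet v x y = true
    · rw [if_pos hcv, if_pos hcv]
    rw [if_neg hcv, if_neg hcv]
    push_neg at hbx hby
    have hyv : y.toNat < v.length := by obtain ⟨h1, _⟩ := hs; omega
    have hs1 := pv_shape_vset v h w x y hs hyv
    have hu1 : pvUnvis (pvVSet v x y) < u := by
      rw [← hu]
      exact pv_unvis_vset_lt v h w x y hs (by omega) (by omega) (by omega) (by omega)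
        (by cases hv : pvVGet v x y <;> simp [hv] at hcv ⊢)
    obtain ⟨g4, rfl⟩ : ∃ k, g = k + 4 := ⟨g - 4, by omega⟩
    set v1 := pvVSet v x y with hv1
    set v2 := pvDfsA maze h w f' v1 (x + 1) y with hv2
    set v3 := pvDfsA maze h w f' v2 x (y + 1) with hv3
    set v4 := pvDfsA maze h w f' v3 (x - 1) y with hv4
    set v5 := pvDfsA maze h w f' v4 x (y - 1) with hv5
    have m2 := pv_dfsA_mono maze h w f' v1 (x + 1) y hs1
    have m3 := pv_dfsA_mono maze h w f' v2 x (y + 1) m2.1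
    have m4 := pv_dfsA_mono maze h w f' v3 (x - 1) y m3.1
    have m5 := pv_dfsA_mono maze h w f' v4 x (y - 1) m4.1
    rw [← hv2] at m2
    rw [← hv3] at m3
    rw [← hv4] at m4
    rw [← hv5] at m5
    have e1 : pvFloodB maze h w (g4 + 3 + 1) v1 ((x + 1, y) :: (x, y + 1) :: (x - 1, y) :: (x, y - 1) :: s)
        = pvFloodB maze h w (g4 + 3) v2 ((x, y + 1) :: (x - 1, y) :: (x, y - 1) :: s) :=
      ih (pvUnvis v1) hu1 v1 (x + 1) y _ f' (g4 + 3) hs1 rfl (by omega) (by simp; omega)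
    have e2 : pvFloodB maze h w (g4 + 2 + 1) v2 ((x, y + 1) :: (x - 1, y) :: (x, y - 1) :: s)
        = pvFloodB maze h w (g4 + 2) v3 ((x - 1, y) :: (x, y - 1) :: s) :=
      ih (pvUnvis v2) (by omega) v2 x (y + 1) _ f' (g4 + 2) m2.1 rfl (by omega) (by simp; omega)
    have e3 : pvFloodB maze h w (g4 + 1 + 1) v3 ((x - 1, y) :: (x, y - 1) :: s)
        = pvFloodB maze h w (g4 + 1) v4 ((x, y - 1) :: s) :=
      ih (pvUnvis v3) (by omega) v3 (x - 1) y _ f' (g4 + 1) m3.1 rfl (by omega) (by simp; omega)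
    have e4 : pvFloodB maze h w (g4 + 0 + 1) v4 ((x, y - 1) :: s)
        = pvFloodB maze h w (g4 + 0) v5 s :=
      ih (pvUnvis v4) (by omega) v4 x (y - 1) _ f' (g4 + 0) m4.1 rfl (by omega) (by simp; omega)
    have e5 : pvFloodB maze h w g4 v5 s = pvFloodB maze h w (g4 + 4) v5 s :=
      pv_flood_fuel maze h w g4 (g4 + 4) v5 s m5.1 (by omega) (by omega)
    calc pvFloodB maze h w (g4 + 4) v1 ((x + 1, y) :: (x, y + 1) :: (x - 1, y) :: (x, y - 1) :: s)
        = pvFloodB maze h w (g4 + 3) v2 ((x, y + 1) :: (x - 1, y) :: (x, y - 1) :: s) := e1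
      _ = pvFloodB maze h w (g4 + 2) v3 ((x - 1, y) :: (x, y - 1) :: s) := e2
      _ = pvFloodB maze h w (g4 + 1) v4 ((x, y - 1) :: s) := e3
      _ = pvFloodB maze h w g4 v5 s := e4
      _ = pvFloodB maze h w (g4 + 4) v5 s := e5

theorem pv_flood_nil (maze : List String) (h w : Int) (f : Nat) (v : List (List Bool)) :
    pvFloodB maze h w f v [] = v := by cases f <;> rfl

-- proof-side names for the two loop bodies
def pvStepA (maze : List String) (h w : Int) (st : List (List Bool) × Int) (y x : Int) :
    List (List Bool) × Int :=
  if pvCell maze x y = some 'X' ∧ pvVGet st.1 x y = false then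
    (pvDfsA maze h w (h.toNat * w.toNat + 1) st.1 x y, st.2 + 1)
  else st

def pvStepB (maze : List String) (h w : Int) (st : List (List Bool) × Int) (y x : Int) :
    List (List Bool) × Int :=
  if pvCell maze x y = some 'X' ∧ pvVGet st.1 x y = false then
    (pvFloodB maze h w (4 * (h.toNat * w.toNat) + 2) st.1 [(x, y)], st.2 + 1)
  else st

theorem pv_step_eq (maze : List String) (h w : Int) (st : List (List Bool) × Int) (y x : Int)
    (hs : pvShape st.1 h w) (hu : pvUnvis st.1 ≤ h.toNat * w.toNat) :
    pvStepA maze h w st y x = pvStepB maze h w st y x ∧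
    pvShape (pvStepA maze h w st y x).1 h w ∧
    pvUnvis (pvStepA maze h w st y x).1 ≤ h.toNat * w.toNat := by
  rw [pvStepA, pvStepB]
  split
  · have hb := pv_bridge maze h w (pvUnvis st.1) st.1 x y [] (h.toNat * w.toNat + 1)
      (4 * (h.toNat * w.toNat) + 1) hs rfl (by omega) (by simp; omega)
    rw [pv_flood_nil] at hb
    have hm := pv_dfsA_mono maze h w (h.toNat * w.toNat + 1) st.1 x y hs
    refine ⟨?_, hm.1, le_trans hm.2 hu⟩
    rw [show 4 * (h.toNat * w.toNat) + 2 = (4 * (h.toNat * w.toNat) + 1) + 1 by omega, hb]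
  · exact ⟨rfl, hs, hu⟩

theorem pv_fold_eq (maze : List String) (h w : Int) :
    ∀ (ps : List (Int × Int)) (st : List (List Bool) × Int),
      pvShape st.1 h w → pvUnvis st.1 ≤ h.toNat * w.toNat →
      ps.foldl (fun st p => pvStepA maze h w st p.1 p.2) st
      = ps.foldl (fun st p => pvStepB maze h w st p.1 p.2) st := by
  intro ps
  induction ps with
  | nil => intro st _ _; rfl
  | cons p ps ih =>
    intro st hs hu
    obtain ⟨he, hs', hu'⟩ := pv_step_eq maze h w st p.1 p.2 hs hu
    simp only [List.foldl_cons, ← he]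
    exact ih _ hs' hu'

-- the flat divmod scan enumerates exactly the (y, x) pairs of the nested scan
theorem pv_flat_pairs (h w : Int) (h0 : 0 ≤ h) (w0 : 0 ≤ w) :
    (PySem.List.pyRange 0 (h * w) 1).map
      (fun i => (PySem.Int.floordiv i w, PySem.Int.mod i w))
    = (PySem.List.pyRange 0 h 1).flatMap
        (fun y => (PySem.List.pyRange 0 w 1).map (fun x => (y, x))) := by
  obtain ⟨hn, rfl⟩ : ∃ n : Nat, h = (n : Int) := ⟨h.toNat, by omega⟩
  induction hn with
  | zero =>
    simp [PySem.List.pyRange_one_eq_nil]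
  | succ n ih =>
    rw [show ((n + 1 : Nat) : Int) = (n : Int) + 1 by push_cast; ring,
      PySem.List.pyRange_one_append 0 ((n : Int) * w) (((n : Int) + 1) * w)
        (by positivity) (by nlinarith),
      PySem.List.pyRange_one_succ_right (show (0:Int) ≤ (n:Int) by positivity),
      List.map_append, List.flatMap_append, ih (by positivity)]
    congr 1
    rw [List.flatMap_cons, List.flatMap_nil, List.append_nil,
      PySem.List.pyRange_one ((n : Int) * w) (((n : Int) + 1) * w),
      PySem.List.pyRange_one 0 w, sub_zero,
      show ((n : Int) + 1) * w - (n : Int) * w = w by ring,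
      List.map_map, List.map_map]
    refine List.map_congr_left ?_
    intro k hk
    rw [List.mem_range] at hk
    have hkw : (k : Int) < w := by omega
    have hwpos : (0 : Int) < w := by omega
    have hfd : PySem.Int.floordiv ((n : Int) * w + (k : Int)) w = (n : Int) := by
      rw [PySem.Int.floordiv_eq_iff_of_pos hwpos]
      constructor
      · have : (0 : Int) ≤ (k : Int) := by positivity
        omega
      · nlinarith
    have hmd : PySem.Int.mod ((n : Int) * w + (k : Int)) w = (k : Int) := by
      have hdm := PySem.Int.floordiv_mul_add_mod ((n : Int) * w + (k : Int)) w
      rw [hfd] at hdm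
      omega
    simp [Function.comp, hfd, hmd]

-- unvisited count and shape of the initial all-False grid
theorem pv_init_shape (h w : Int) :
    pvShape (List.replicate h.toNat (List.replicate w.toNat false)) h w := by
  constructor
  · simp
  · intro r hr
    rw [List.eq_of_mem_replicate hr]
    simp

theorem pv_init_unvis (hn wn : Nat) :
    pvUnvis (List.replicate hn (List.replicate wn false)) = hn * wn := by
  simp [pvUnvis, List.count_replicate]

-- the two ports compute the same scan over the same pair sequence
theorem pv_ports_eq (maze : List String) : count_x_shapes maze = count_x_shapes_alt maze := by
  have hw0 : (0 : Int) ≤ PySem.Str.len (maze.headD "") := by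
    rw [PySem.Str.len_eq]; positivity
  set h : Int := (maze.length : Int) with hh
  set w : Int := PySem.Str.len (maze.headD "") with hwdef
  have hh0 : (0 : Int) ≤ h := by positivity
  show ((PySem.List.pyRange 0 h 1).foldl
      (fun st y => (PySem.List.pyRange 0 w 1).foldl (fun st x => pvStepA maze h w st y x) st)
      (List.replicate h.toNat (List.replicate w.toNat false), (0 : Int))).2
    = ((PySem.List.pyRange 0 (h * w) 1).foldl
      (fun st i => pvStepB maze h w st (PySem.Int.floordiv i w) (PySem.Int.mod i w))
      (List.replicate h.toNat (List.replicate w.toNat false), (0 : Int))).2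
  have hA : ((PySem.List.pyRange 0 h 1).flatMap
        (fun y => (PySem.List.pyRange 0 w 1).map (fun x => (y, x)))).foldl
        (fun st (p : Int × Int) => pvStepA maze h w st p.1 p.2)
        (List.replicate h.toNat (List.replicate w.toNat false), (0 : Int))
      = (PySem.List.pyRange 0 h 1).foldl
        (fun st y => (PySem.List.pyRange 0 w 1).foldl (fun st x => pvStepA maze h w st y x) st)
        (List.replicate h.toNat (List.replicate w.toNat false), (0 : Int)) := by
    rw [List.foldl_flatMap]
    simp only [List.foldl_map]
  have hB : ((PySem.List.pyRange 0 (h * w) 1).map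
        (fun i => (PySem.Int.floordiv i w, PySem.Int.mod i w))).foldl
        (fun st (p : Int × Int) => pvStepB maze h w st p.1 p.2)
        (List.replicate h.toNat (List.replicate w.toNat false), (0 : Int))
      = (PySem.List.pyRange 0 (h * w) 1).foldl
        (fun st i => pvStepB maze h w st (PySem.Int.floordiv i w) (PySem.Int.mod i w))
        (List.replicate h.toNat (List.replicate w.toNat false), (0 : Int)) := by
    rw [List.foldl_map]
  rw [← hA, ← hB, pv_flat_pairs h w hh0 hw0]
  rw [pv_fold_eq maze h w _ _ (pv_init_shape h w)
    (by rw [show h.toNat * w.toNat = pvUnvis (List.replicate h.toNat (List.replicate w.toNat false))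
          from (pv_init_unvis h.toNat w.toNat).symm])]

-- ===== VERDICT (by name: the statement is the Claim_ definition above) =====
theorem count_x_shapes_spec : Claim_equal_count_x_shapes := by
  intro maze _ _
  exact pv_ports_eq maze
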